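/- GENERATED by farm/mkstatement.py from design/units.tsv (unit `start_decoder.C4d`) and the assertions of Vorbis/Spec/StartDecoderC4.lean — do not edit.
   THE STATEMENT of the proof unit `start_decoder.C4d`: segment C4d of `start_decoder` (1 instructions; entries 0x114820;
   exits 0x113b22; ranges 0x114820-0x114820)
   takes each of its entry assertions to one of its exit assertions (`Vorbis.Spec.StartDecoder.SegC4d`), given the contracts of its callees.
   What the names mean: Vorbis/Spec/Basic.lean (the shared hypotheses), Vorbis/Spec/StartDecoderC4.lean (the assertions). The theorem to prove:
   `theorem start_decoder_C4d_ok : Vorbis.Spec.start_decoder_C4d.Statement`. -/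
import Vorbis.Spec.StartDecoderC4
namespace Vorbis.Spec.start_decoder_C4d
open X86 X86.User Asan

/-- The statement of unit `start_decoder.C4d`. -/
def Statement : Prop :=
  ∀ (Lay : Layout) (_hLay : Lay.hi = 0x1000000) (μ : Microarch) (_hμ : UserX.MicroOK μ) (u₀ : State)
    (_hcode : HasCodeNat Lay u₀ Vorbis.L.start_decoder.entry Vorbis.Code.code_start_decoder.nat Vorbis.L.start_decoder.size),
    Vorbis.Spec.StartDecoder.SegC4d Lay μ u₀

end Vorbis.Spec.start_decoder_C4d
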